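-- pv_equiv track=rewrite | github.com/Algorithm-Study/Algorithm | graph/P150368_이영섭.py | solution
-- ===== SOURCE A (Python) =====
-- def solution(users, emoticons):
--     answer = [0, 0]
--     dl = []
--     discount = []
--     discount_percent = [10, 20, 30, 40]
--
--     # 중복조합 만들기
--     def dfs(num, discount_list, emoticons):
--         if(num == emoticons):
--             discount.append(list(discount_list))
--             return
--         for dp in discount_percent:
--             discount_list.append(dp)
--             dfs(num+1, discount_list, emoticons)
--             discount_list.pop()
--
--     dfs(0, dl, len(emoticons))
--
--     # 완전 탐색으로 조건에 맞게 답 구하기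
--     for dis in discount:
--         add_service = 0
--         sales = 0
--         for user in users:
--             emo_price = [(100-x)*y//100 for x, y in zip(dis, emoticons) if x >= user[0]]
--             if sum(emo_price) >= user[1]:
--                 add_service += 1
--             else:
--                 sales += sum(emo_price)
--         if add_service > answer[0]:
--             answer[0] = add_service
--             answer[1] = sales
--         elif add_service == answer[0] and sales > answer[1]:
--             answer[1] = sales
--     return answer
-- ===== SOURCE B (Python) =====
-- def solution(users, emoticons):
--     n = len(emoticons)
--     best = (0, 0)
--     for code in range(4 ** n):
--         rates = []
--         c = code
--         for _ in range(n):
--             rates.append((c % 4 + 1) * 10)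
--             c //= 4
--         subs = 0
--         sales = 0
--         for user in users:
--             total = 0
--             for rate, price in zip(rates, emoticons):
--                 if rate >= user[0]:
--                     total += (100 - rate) * price // 100
--             if total >= user[1]:
--                 subs += 1
--             else:
--                 sales += total
--         if (subs, sales) > best:
--             best = (subs, sales)
--     return [best[0], best[1]]
-- ===== Notes on version B (the rewrite author's own statement) =====
-- stated objective: alternative
-- what changed: A recursively builds and materializes the full list of all 4^n discount combinations and then scores them in a second phase; B enumerates each combination by decoding a base-4 counter (one integer code per combo) and scores it inline against the users in the same pass, keeping only the running lexicographic best (subscribers, sales).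
import Mathlib
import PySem

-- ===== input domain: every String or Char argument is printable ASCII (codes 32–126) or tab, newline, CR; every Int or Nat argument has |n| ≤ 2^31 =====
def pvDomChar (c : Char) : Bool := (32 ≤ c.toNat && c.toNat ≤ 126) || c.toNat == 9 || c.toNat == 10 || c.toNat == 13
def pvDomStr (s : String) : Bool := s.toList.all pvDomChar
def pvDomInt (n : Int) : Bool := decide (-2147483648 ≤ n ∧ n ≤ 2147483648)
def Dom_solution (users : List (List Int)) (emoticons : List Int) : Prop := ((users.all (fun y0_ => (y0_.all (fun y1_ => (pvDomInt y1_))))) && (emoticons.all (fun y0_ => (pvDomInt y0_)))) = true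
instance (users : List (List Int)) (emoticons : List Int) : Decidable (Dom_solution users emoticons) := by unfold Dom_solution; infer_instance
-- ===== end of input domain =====

-- B replaces A's recursive dfs that materializes the list of all 4^n discount combos with a
-- base-4 counter loop that decodes each combo from an integer code and scores it inline
-- (objective: alternative decomposition; same asymptotic cost).

-- ===== PORT A =====
-- A's dfs over discount_percent = [10,20,30,40]: all length-n lists, first position varying slowest
def pvCombosA : Nat → List (List Int)
  | 0 => [[]]
  | n+1 => [10, 20, 30, 40].flatMap (fun dp => (pvCombosA n).map (fun t => dp :: t))

-- the inner 'for user in users' loop of A, returning (add_service, sales)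
def pvScoreA (users : List (List Int)) (emoticons : List Int) (dis : List Int) : Int × Int :=
  users.foldl (fun st user =>
    -- user[0] / user[1]: IndexError on users shorter than 2 is excluded by Pre_solution
    let u0 := PySem.List.pyGetD user 0 0
    let u1 := PySem.List.pyGetD user 1 0
    let emo_price := ((dis.zip emoticons).filter (fun xy => decide (xy.1 ≥ u0))).map
        (fun xy => PySem.Int.floordiv ((100 - xy.1) * xy.2) 100)
    if emo_price.sum ≥ u1 then (st.1 + 1, st.2) else (st.1, st.2 + emo_price.sum)) (0, 0)

def solution (users : List (List Int)) (emoticons : List Int) : List Int :=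
  let discount := pvCombosA emoticons.length
  let answer := discount.foldl (fun ans dis =>
    let s := pvScoreA users emoticons dis
    if s.1 > ans.1 then (s.1, s.2)
    else if s.1 = ans.1 ∧ s.2 > ans.2 then (ans.1, s.2)
    else ans) ((0 : Int), (0 : Int))
  [answer.1, answer.2]

-- ===== PORT B =====
-- B's inner 'for _ in range(n): rates.append((c % 4 + 1) * 10); c //= 4'
def pvBuildRates (n : Nat) (code : Int) : List Int :=
  ((PySem.List.pyRange 0 (n : Int) 1).foldl (fun st _ =>
    (st.1 ++ [(PySem.Int.mod st.2 4 + 1) * 10], PySem.Int.floordiv st.2 4)) ([], code)).1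

-- B's 'for user in users' loop with the inline total accumulation
def pvScoreB (users : List (List Int)) (emoticons : List Int) (rates : List Int) : Int × Int :=
  users.foldl (fun st user =>
    let u0 := PySem.List.pyGetD user 0 0
    let u1 := PySem.List.pyGetD user 1 0
    let total := (rates.zip emoticons).foldl (fun t rp =>
      if rp.1 ≥ u0 then t + PySem.Int.floordiv ((100 - rp.1) * rp.2) 100 else t) 0
    if total ≥ u1 then (st.1 + 1, st.2) else (st.1, st.2 + total)) (0, 0)

def solution_alt (users : List (List Int)) (emoticons : List Int) : List Int :=
  let n := emoticons.length
  let best := (PySem.List.pyRange 0 ((4 : Int) ^ n) 1).foldl (fun best code =>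
    let s := pvScoreB users emoticons (pvBuildRates n code)
    if s.1 > best.1 ∨ (s.1 = best.1 ∧ s.2 > best.2) then s else best) ((0 : Int), (0 : Int))
  [best.1, best.2]

-- ===== PRECONDITION & SPEC =====
-- A evaluates user[0] and user[1] for every user; a user list shorter than 2 raises IndexError.
def Pre_solution (users : List (List Int)) (emoticons : List Int) : Prop :=
  ∀ u ∈ users, 2 ≤ u.length
instance (users : List (List Int)) (emoticons : List Int) : Decidable (Pre_solution users emoticons) := by unfold Pre_solution; infer_instance

def pvWitness_solution : List (List Int) × List Int := ([[40, 100], [10, 5000]], [7000, 100])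

def Spec_solution (users : List (List Int)) (emoticons : List Int) (out : List Int) : Prop := out = solution_alt users emoticons
instance (users : List (List Int)) (emoticons : List Int) (out : List Int) : Decidable (Spec_solution users emoticons out) := by unfold Spec_solution; infer_instance

-- ===== CLAIM (what is proved, stated in full; the proofs are below) =====
def Claim_equal_solution : Prop := ∀ (users : List (List Int)) (emoticons : List Int), Dom_solution users emoticons → Pre_solution users emoticons → Spec_solution users emoticons (solution users emoticons)

-- ===== LEMMAS AND PROOFS =====

-- the lexicographic 'keep the better (subs, sales)' update both folds compute
def pvStep (b s : Int × Int) : Int × Int :=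
  if s.1 > b.1 ∨ (s.1 = b.1 ∧ s.2 > b.2) then s else b

theorem pvStep_comm (z x y : Int × Int) : pvStep (pvStep z x) y = pvStep (pvStep z y) x := by
  unfold pvStep
  rcases x with ⟨x1, x2⟩; rcases y with ⟨y1, y2⟩; rcases z with ⟨z1, z2⟩
  split_ifs <;> simp_all [Prod.mk.injEq] <;> omega

-- A's tie-broken update is exactly pvStep
theorem stepA_eq_pvStep (ans s : Int × Int) :
    (if s.1 > ans.1 then (s.1, s.2)
     else if s.1 = ans.1 ∧ s.2 > ans.2 then (ans.1, s.2)
     else ans) = pvStep ans s := by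
  unfold pvStep
  rcases s with ⟨s1, s2⟩; rcases ans with ⟨a1, a2⟩
  split_ifs <;> simp_all [Prod.mk.injEq] <;> omega

-- A's per-user comprehension sum equals B's accumulating loop
theorem pvInnerSum (u0 : Int) (l : List (Int × Int)) (t : Int) :
    l.foldl (fun t rp => if rp.1 ≥ u0 then t + PySem.Int.floordiv ((100 - rp.1) * rp.2) 100 else t) t
      = t + ((l.filter (fun xy => decide (xy.1 ≥ u0))).map
          (fun xy => PySem.Int.floordiv ((100 - xy.1) * xy.2) 100)).sum := by
  induction l generalizing t with
  | nil => simp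
  | cons hd tl ih =>
    simp only [List.foldl_cons, ih, List.filter_cons]
    by_cases h : hd.1 ≥ u0 <;> simp [h] <;> ring

theorem score_eq (users : List (List Int)) (emoticons : List Int) (dis : List Int) :
    pvScoreA users emoticons dis = pvScoreB users emoticons dis := by
  unfold pvScoreA pvScoreB
  congr 1
  funext st user
  simp only [pvInnerSum]
  simp

-- the recursion pvBuildRates computes: peel base-4 digits, least significant first
def pvRatesRec : Nat → Int → List Int
  | 0, _ => []
  | n+1, c => (PySem.Int.mod c 4 + 1) * 10 :: pvRatesRec n (PySem.Int.floordiv c 4)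

theorem pvBuildRates_loop (l : List Int) (c : Int) (acc : List Int) :
    (l.foldl (fun st _ =>
      (st.1 ++ [(PySem.Int.mod st.2 4 + 1) * 10], PySem.Int.floordiv st.2 4)) (acc, c)).1
      = acc ++ pvRatesRec l.length c := by
  induction l generalizing c acc with
  | nil => simp [pvRatesRec]
  | cons hd tl ih =>
    rw [List.foldl_cons, ih]
    simp [pvRatesRec]

theorem pvBuildRates_eq (n : Nat) (c : Int) : pvBuildRates n c = pvRatesRec n c := by
  unfold pvBuildRates
  rw [pvBuildRates_loop]
  simp [PySem.List.length_pyRange_one]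

theorem pvRatesRec_digit (n q r : Nat) (hr : r < 4) :
    pvRatesRec (n+1) (Int.ofNat (4 * q + r))
      = ((r : Int) + 1) * 10 :: pvRatesRec n (Int.ofNat q) := by
  have hm : PySem.Int.mod (Int.ofNat (4 * q + r)) 4 = (r : Int) := by
    have h := PySem.Int.mod_natCast (4 * q + r) 4
    have : ((4 * q + r) % 4 : Nat) = r := by omega
    rw [this] at h
    exact_mod_cast h
  have hd : PySem.Int.floordiv (Int.ofNat (4 * q + r)) 4 = (q : Int) := by
    have h := PySem.Int.floordiv_natCast (4 * q + r) 4
    have : ((4 * q + r) / 4 : Nat) = q := by omega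
    rw [this] at h
    exact_mod_cast h
  simp only [pvRatesRec]
  rw [hm, hd]
  rfl

-- List.range (4*m) as blocks of four consecutive codes
theorem pvRangeBlocks (m : Nat) :
    List.range (4 * m) = (List.range m).flatMap (fun q => [4*q, 4*q+1, 4*q+2, 4*q+3]) := by
  induction m with
  | zero => simp
  | succ m ih =>
    have h4 : 4 * (m + 1) = (4 * m) + 1 + 1 + 1 + 1 := by omega
    rw [h4, List.range_succ, List.range_succ, List.range_succ, List.range_succ,
        List.range_succ, List.flatMap_append, ← ih]
    simp

-- the two product orders are permutations of one another (multiset swap)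
theorem pvSwap (R : List Int) (L : List (List Int)) :
    (R.flatMap (fun d => L.map (fun t => d :: t))).Perm
      (L.flatMap (fun t => R.map (fun d => d :: t))) := by
  rw [← Multiset.coe_eq_coe, ← Multiset.coe_bind, ← Multiset.coe_bind]
  simp only [← Multiset.map_coe]
  exact Multiset.bind_map_comm _ _

-- A's combo list is a permutation of B's decoded code list
theorem pvCombos_perm (n : Nat) :
    (pvCombosA n).Perm ((List.range (4 ^ n)).map (fun q => pvRatesRec n (Int.ofNat q))) := by
  induction n with
  | zero => simp [pvCombosA, pvRatesRec]
  | succ n ih =>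
    have hpow : 4 ^ (n + 1) = 4 * 4 ^ n := by ring
    rw [hpow, pvRangeBlocks, List.map_flatMap]
    have hmap : ∀ q ∈ List.range (4 ^ n),
        ([4*q, 4*q+1, 4*q+2, 4*q+3].map (fun k => pvRatesRec (n+1) (Int.ofNat k)))
          = [10, 20, 30, 40].map (fun d => d :: pvRatesRec n (Int.ofNat q)) := by
      intro q _
      simp only [List.map_cons, List.map_nil]
      have e0 : pvRatesRec (n+1) (Int.ofNat (4*q)) = 10 :: pvRatesRec n (Int.ofNat q) := by
        simpa using pvRatesRec_digit n q 0 (by omega)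
      have e1 : pvRatesRec (n+1) (Int.ofNat (4*q+1)) = 20 :: pvRatesRec n (Int.ofNat q) := by
        simpa using pvRatesRec_digit n q 1 (by omega)
      have e2 : pvRatesRec (n+1) (Int.ofNat (4*q+2)) = 30 :: pvRatesRec n (Int.ofNat q) := by
        simpa using pvRatesRec_digit n q 2 (by omega)
      have e3 : pvRatesRec (n+1) (Int.ofNat (4*q+3)) = 40 :: pvRatesRec n (Int.ofNat q) := by
        simpa using pvRatesRec_digit n q 3 (by omega)
      rw [e0, e1, e2, e3]
    have p1 : (pvCombosA (n+1)).Perm ([10,20,30,40].flatMap (fun d =>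
        ((List.range (4^n)).map (fun q => pvRatesRec n (Int.ofNat q))).map (fun t => d :: t))) :=
      List.Perm.flatMap_left _ (fun d _ => ih.map _)
    have p2 := pvSwap [10,20,30,40] ((List.range (4^n)).map (fun q => pvRatesRec n (Int.ofNat q)))
    have p3 : ((List.range (4^n)).map (fun q => pvRatesRec n (Int.ofNat q))).flatMap
        (fun t => [10,20,30,40].map (fun d => d :: t))
        = (List.range (4^n)).flatMap (fun q => [10,20,30,40].map (fun d => d :: pvRatesRec n (Int.ofNat q))) := by
      rw [List.flatMap_map]
    exact p1.trans (p2.trans (List.Perm.of_eq (p3.trans (List.flatMap_congr hmap).symm)))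

theorem solution_eq (users : List (List Int)) (emoticons : List Int) :
    solution users emoticons = solution_alt users emoticons := by
  simp only [solution, solution_alt]
  have hA : (pvCombosA emoticons.length).foldl (fun ans dis =>
      let s := pvScoreA users emoticons dis
      if s.1 > ans.1 then (s.1, s.2)
      else if s.1 = ans.1 ∧ s.2 > ans.2 then (ans.1, s.2)
      else ans) ((0 : Int), (0 : Int))
      = ((pvCombosA emoticons.length).map (pvScoreB users emoticons)).foldl pvStep ((0:Int), (0:Int)) := by
    rw [List.foldl_map]
    congr 1
    funext ans dis
    simp only [score_eq]
    exact stepA_eq_pvStep _ _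
  have hB : (PySem.List.pyRange 0 ((4 : Int) ^ emoticons.length) 1).foldl (fun best code =>
      let s := pvScoreB users emoticons (pvBuildRates emoticons.length code)
      if s.1 > best.1 ∨ (s.1 = best.1 ∧ s.2 > best.2) then s else best) ((0 : Int), (0 : Int))
      = ((List.range (4 ^ emoticons.length)).map
          (fun q => pvScoreB users emoticons (pvRatesRec emoticons.length (Int.ofNat q)))).foldl
          pvStep ((0:Int), (0:Int)) := by
    have hr : PySem.List.pyRange 0 ((4 : Int) ^ emoticons.length) 1
        = (List.range (4 ^ emoticons.length)).map Int.ofNat := by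
      rw [PySem.List.pyRange_one]
      have ht : (((4 : Int) ^ emoticons.length) - 0).toNat = 4 ^ emoticons.length := by
        rw [show ((4:Int) ^ emoticons.length) - 0 = ((4 ^ emoticons.length : Nat) : Int) by push_cast; ring]
        exact Int.toNat_natCast _
      rw [ht]
      simp
    rw [hr, List.foldl_map, List.foldl_map]
    congr 1
    funext best q
    simp only [pvBuildRates_eq, pvStep]
  rw [hA, hB]
  have hperm := ((pvCombos_perm emoticons.length).map (pvScoreB users emoticons))
  rw [List.map_map] at hperm
  rw [hperm.foldl_eq' (fun x _ y _ z => pvStep_comm z x y) _]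
  simp [Function.comp_def]

-- ===== VERDICT (by name: the statement is the Claim_ definition above) =====
theorem solution_spec : Claim_equal_solution := by
  intro users emoticons _ _
  unfold Spec_solution
  exact solution_eq users emoticons
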